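-- pv_equiv track=rewrite | github.com/aseghehey/robot-construction-algorithms | robotomaton/comparison.py | iter
-- ===== SOURCE A (Python) =====
-- def iter(previous, sprocket):
--     cache = [-1] * len(sprocket)
--     total = [-1] * len(sprocket)
--
--     cache[0] = sprocket[0]
--     total[0] = sprocket[0]
--
--     for i in range(1, len(sprocket)):
--         if previous[i] == 0:
--             cache[i] = sprocket[i]
--
--         elif previous[i] == i:
--             cache[i] = sprocket[i] + total[i - 1]
--
--         else:
--             cache[i] = sprocket[i] + total[i - 1] - total[i - previous[i] - 1]
--
--         total[i] = cache[i] + total[i - 1]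
--
--     return cache[-1]
-- ===== SOURCE B (Python) =====
-- def iter(previous, sprocket):
--     cache = [sprocket[0]]
--     for i in range(1, len(sprocket)):
--         window = 0
--         for j in range(previous[i]):
--             window += cache[i - 1 - j]
--         cache.append(sprocket[i] + window)
--     return cache[-1]
-- ===== Notes on version B (the rewrite author's own statement) =====
-- stated objective: alternative
-- what changed: Drops A's prefix-sum total array and the three-way branch entirely: B keeps only the cache list and computes each entry with an inner loop that directly adds up the last previous[i] cache values (naive window summation instead of prefix-sum differencing), trading O(n) for O(n^2) worst case.
-- outside the precondition, e.g. on iter([0, -1], [1, 2]): A returns 4, B returns 2; on iter([0, 3, 2], [1, 1, 1]): A returns 3, B raises IndexError; on iter([], []): A raises IndexError, B raises IndexError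
import Mathlib
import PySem

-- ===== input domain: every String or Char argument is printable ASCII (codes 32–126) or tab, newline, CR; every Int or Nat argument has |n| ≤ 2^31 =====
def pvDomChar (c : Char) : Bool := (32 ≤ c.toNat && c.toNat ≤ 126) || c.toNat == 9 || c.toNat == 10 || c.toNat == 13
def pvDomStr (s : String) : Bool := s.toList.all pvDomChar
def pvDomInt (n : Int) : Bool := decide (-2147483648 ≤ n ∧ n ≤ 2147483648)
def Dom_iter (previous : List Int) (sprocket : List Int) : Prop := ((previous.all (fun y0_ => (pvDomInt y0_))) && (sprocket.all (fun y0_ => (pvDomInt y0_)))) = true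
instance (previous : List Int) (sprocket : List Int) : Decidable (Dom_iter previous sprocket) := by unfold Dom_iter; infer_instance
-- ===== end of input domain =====

-- B drops A's prefix-sum total array and three-way branch: it keeps only the cache list and sums the
-- last previous[i] cache values with an inner loop (objective: alternative; naive window summation).


-- ===== PORT A =====
def iterStepA (previous : List Int) (sprocket : List Int)
    (st : List Int × List Int) (i : Int) : List Int × List Int :=
  let c :=
    if PySem.List.pyGetD previous i 0 = 0 then
      PySem.List.pyGetD sprocket i 0
    else if PySem.List.pyGetD previous i 0 = i then
      PySem.List.pyGetD sprocket i 0 + PySem.List.pyGetD st.2 (i - 1) 0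
    else
      PySem.List.pyGetD sprocket i 0 + PySem.List.pyGetD st.2 (i - 1) 0
        - PySem.List.pyGetD st.2 (i - PySem.List.pyGetD previous i 0 - 1) 0
  let cache' := PySem.List.pySetD st.1 i c
  let total' := PySem.List.pySetD st.2 i (c + PySem.List.pyGetD st.2 (i - 1) 0)
  (cache', total')

def iter (previous : List Int) (sprocket : List Int) : Int :=
  let cache0 := PySem.List.pySetD (List.replicate sprocket.length (-1 : Int)) 0 (PySem.List.pyGetD sprocket 0 0)
  let total0 := PySem.List.pySetD (List.replicate sprocket.length (-1 : Int)) 0 (PySem.List.pyGetD sprocket 0 0)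
  let st := (PySem.List.pyRange 1 (PySem.List.len sprocket) 1).foldl (iterStepA previous sprocket) (cache0, total0)
  PySem.List.pyGetD st.1 (-1) 0

-- ===== PORT B =====
def iterStepB (previous : List Int) (sprocket : List Int) (cache : List Int) (i : Int) : List Int :=
  let window := (PySem.List.pyRange 0 (PySem.List.pyGetD previous i 0) 1).foldl
    (fun acc j => acc + PySem.List.pyGetD cache (i - 1 - j) 0) 0
  cache ++ [PySem.List.pyGetD sprocket i 0 + window]

def iter_alt (previous : List Int) (sprocket : List Int) : Int :=
  let cache := (PySem.List.pyRange 1 (PySem.List.len sprocket) 1).foldl (iterStepB previous sprocket)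
    [PySem.List.pyGetD sprocket 0 0]
  PySem.List.pyGetD cache (-1) 0

-- ===== PRECONDITION & SPEC =====
-- Pre_ excludes inputs where A raises IndexError (empty sprocket, previous too short) and inputs with
-- previous[i] outside [0, i]: there A either raises or returns a value produced by accidental
-- negative-index wraparound into the sentinel-filled total array, and B's window loop likewise either
-- raises or wraps differently, so neither corner value is specified.
def Pre_iter (previous : List Int) (sprocket : List Int) : Prop :=
  sprocket ≠ [] ∧
  ∀ i < sprocket.length, i = 0 ∨
    (i < previous.length ∧ 0 ≤ previous.getD i 0 ∧ previous.getD i 0 ≤ (i : Int))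
instance (previous : List Int) (sprocket : List Int) : Decidable (Pre_iter previous sprocket) := by
  unfold Pre_iter; infer_instance
def pvWitness_iter : List Int × List Int := ([0, 1, 1], [1, 2, 3])

def Spec_iter (previous : List Int) (sprocket : List Int) (out : Int) : Prop := out = iter_alt previous sprocket
instance (previous : List Int) (sprocket : List Int) (out : Int) : Decidable (Spec_iter previous sprocket out) := by unfold Spec_iter; infer_instance

-- ===== CLAIM (what is proved, stated in full; the proofs are below) =====
def Claim_equal_iter : Prop := ∀ (previous : List Int) (sprocket : List Int), Dom_iter previous sprocket → Pre_iter previous sprocket → Spec_iter previous sprocket (iter previous sprocket)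

-- ===== LEMMAS AND PROOFS =====
-- Loop states after m steps: stAfun = A's (cache, total) pair after range(1, m); stBfun = B's cache
-- list after range(1, m). loop_inv links them: A's total[k] is the sum of B's first k+1 cache entries,
-- and the last written cache values agree.
def stAfun (previous : List Int) (sprocket : List Int) (m : Nat) : List Int × List Int :=
  (PySem.List.pyRange 1 (m : Int) 1).foldl (iterStepA previous sprocket)
    (PySem.List.pySetD (List.replicate sprocket.length (-1 : Int)) 0 (PySem.List.pyGetD sprocket 0 0),
     PySem.List.pySetD (List.replicate sprocket.length (-1 : Int)) 0 (PySem.List.pyGetD sprocket 0 0))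

def stBfun (previous : List Int) (sprocket : List Int) (m : Nat) : List Int :=
  (PySem.List.pyRange 1 (m : Int) 1).foldl (iterStepB previous sprocket) [PySem.List.pyGetD sprocket 0 0]

lemma stAfun_succ (previous sprocket : List Int) (m : Nat) (h : 1 ≤ m) :
    stAfun previous sprocket (m+1) = iterStepA previous sprocket (stAfun previous sprocket m) (m : Int) := by
  unfold stAfun
  have : ((m+1 : Nat) : Int) = (m : Int) + 1 := by push_cast; ring
  rw [this, PySem.List.pyRange_one_succ_right (by exact_mod_cast h), List.foldl_append]
  rfl

lemma stBfun_succ (previous sprocket : List Int) (m : Nat) (h : 1 ≤ m) :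
    stBfun previous sprocket (m+1) = iterStepB previous sprocket (stBfun previous sprocket m) (m : Int) := by
  unfold stBfun
  have : ((m+1 : Nat) : Int) = (m : Int) + 1 := by push_cast; ring
  rw [this, PySem.List.pyRange_one_succ_right (by exact_mod_cast h), List.foldl_append]
  rfl

lemma sum_drop (xs : List Int) (j : Nat) : (xs.drop j).sum = xs.sum - (xs.take j).sum := by
  have h : xs.sum = (xs.take j).sum + (xs.drop j).sum := by
    conv_lhs => rw [← List.take_append_drop j xs]
    rw [List.sum_append]
  omega

lemma window_sum (cB : List Int) (i q : Nat) (hlen : cB.length = i) (hq : q ≤ i) :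
    (PySem.List.pyRange 0 (q : Int) 1).foldl
      (fun acc j => acc + PySem.List.pyGetD cB ((i : Int) - 1 - j) 0) 0
    = (cB.drop (i - q)).sum := by
  induction q with
  | zero =>
    rw [Nat.cast_zero, PySem.List.pyRange_one_eq_nil (by omega : (0:Int) ≤ 0)]
    rw [List.drop_of_length_le (by omega : cB.length ≤ i - 0)]
    simp
  | succ q ih =>
    have hcast : ((q+1 : Nat) : Int) = (q : Int) + 1 := by push_cast; ring
    rw [hcast, PySem.List.pyRange_one_succ_right (by omega : (0:Int) ≤ (q:Int)), List.foldl_append,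
        ih (by omega)]
    have hidx : (i : Int) - 1 - (q : Int) = ((i - q - 1 : Nat) : Int) := by omega
    have hlt : i - q - 1 < cB.length := by omega
    have hdrop : cB.drop (i - (q+1)) = cB[i - q - 1] :: cB.drop (i - q) := by
      rw [show i - (q+1) = i - q - 1 by omega, List.drop_eq_getElem_cons hlt,
          show i - q - 1 + 1 = i - q by omega]
    rw [hdrop]
    simp only [List.foldl_cons, List.foldl_nil, hidx, PySem.List.pyGetD_natCast,
        List.getD_eq_getElem?_getD, List.getElem?_eq_getElem hlt, Option.getD_some, List.sum_cons]
    ring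

lemma loop_inv (previous sprocket : List Int)
    (hpre : ∀ i < sprocket.length, i = 0 ∨
      (i < previous.length ∧ 0 ≤ previous.getD i 0 ∧ previous.getD i 0 ≤ (i : Int)))
    (m : Nat) (h1 : 1 ≤ m) (h2 : m ≤ sprocket.length) :
    (stAfun previous sprocket m).1.length = sprocket.length ∧
    (stAfun previous sprocket m).2.length = sprocket.length ∧
    (stBfun previous sprocket m).length = m ∧
    (∀ k < m, (stAfun previous sprocket m).2.getD k 0 = ((stBfun previous sprocket m).take (k+1)).sum) ∧
    (stAfun previous sprocket m).1.getD (m-1) 0 = (stBfun previous sprocket m).getD (m-1) 0 := by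
  induction m with
  | zero => omega
  | succ m ih =>
    rcases Nat.eq_zero_or_pos m with hm0 | hmpos
    · -- base case m+1 = 1
      subst hm0
      have hn : 0 < sprocket.length := by omega
      have hA : stAfun previous sprocket 1 =
          (PySem.List.pySetD (List.replicate sprocket.length (-1 : Int)) 0 (PySem.List.pyGetD sprocket 0 0),
           PySem.List.pySetD (List.replicate sprocket.length (-1 : Int)) 0 (PySem.List.pyGetD sprocket 0 0)) := by
        simp [stAfun, PySem.List.pyRange_one_eq_nil (by omega : (1:Int) ≤ 1)]
      have hB : stBfun previous sprocket 1 = [PySem.List.pyGetD sprocket 0 0] := by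
        simp [stBfun, PySem.List.pyRange_one_eq_nil (by omega : (1:Int) ≤ 1)]
      rw [hA, hB]
      refine ⟨?_, ?_, by simp, ?_, ?_⟩
      · simp [PySem.List.length_pySetD]
      · simp [PySem.List.length_pySetD]
      · intro k hk
        interval_cases k
        rw [PySem.List.pySetD_of_nonneg _ _ (by omega)]
        simp [List.getD_eq_getElem?_getD, hn]
      · rw [PySem.List.pySetD_of_nonneg _ _ (by omega)]
        simp [List.getD_eq_getElem?_getD, hn]
    · -- inductive step
      have h2' : m ≤ sprocket.length := by omega
      have hmlt : m < sprocket.length := by omega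
      obtain ⟨hA1, hA2, hB1, hkk, hc⟩ := ih hmpos h2'
      set sA := stAfun previous sprocket m with hsA
      set cB := stBfun previous sprocket m with hsB
      simp only [List.getD_eq_getElem?_getD] at hkk hc
      obtain ⟨hplen, hp0, hpm⟩ := (hpre m hmlt).resolve_left (by omega)
      simp only [List.getD_eq_getElem?_getD] at hp0 hpm
      have hm1cast : (m : Int) - 1 = ((m-1 : Nat) : Int) := by omega
      have htotal : sA.2[m-1]?.getD 0 = cB.sum := by
        have h := hkk (m-1) (by omega)
        rw [Nat.sub_add_cancel hmpos] at h
        rw [h, List.take_of_length_le (by omega)]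
      have hm0' : ¬ ((m : Int) = 0) := by omega
      rw [stAfun_succ previous sprocket m hmpos, stBfun_succ previous sprocket m hmpos, ← hsA, ← hsB]
      -- the two steps append / write the same new cache value c
      obtain ⟨c, hcA, hcB⟩ : ∃ c : Int,
          iterStepA previous sprocket sA (m : Int) = (sA.1.set m c, sA.2.set m (c + cB.sum)) ∧
          iterStepB previous sprocket cB (m : Int) = cB ++ [c] := by
        by_cases hp00 : previous[m]?.getD 0 = 0
        · refine ⟨sprocket[m]?.getD 0, ?_, ?_⟩
          · simp [iterStepA, hp00, hm1cast, htotal]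
          · simp only [iterStepB, PySem.List.pyGetD_natCast, List.getD_eq_getElem?_getD]
            rw [hp00, PySem.List.pyRange_one_eq_nil (by omega : (0:Int) ≤ 0)]
            simp
        · by_cases hpmm : previous[m]?.getD 0 = (m : Int)
          · refine ⟨sprocket[m]?.getD 0 + cB.sum, ?_, ?_⟩
            · simp [iterStepA, hpmm, hm1cast, htotal, hmpos.ne']
            · simp only [iterStepB, PySem.List.pyGetD_natCast, List.getD_eq_getElem?_getD]
              rw [hpmm, window_sum cB m m hB1 (le_refl m)]
              simp
          · set q : Nat := (previous[m]?.getD 0).toNat with hq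
            have hqpos : 0 < q := by omega
            have hqm : q ≤ m := by omega
            have hq1 : (m : Int) - previous[m]?.getD 0 - 1 = ((m - q - 1 : Nat) : Int) := by omega
            have hq3 : m - q - 1 + 1 = m - q := by omega
            have htk : sA.2[m - q - 1]?.getD 0 = (cB.take (m - q)).sum := by
              have h := hkk (m - q - 1) (by omega)
              rwa [hq3] at h
            refine ⟨sprocket[m]?.getD 0 + cB.sum - (cB.take (m - q)).sum, ?_, ?_⟩
            · simp only [iterStepA, PySem.List.pyGetD_natCast, List.getD_eq_getElem?_getD]
              rw [if_neg hp00, if_neg hpmm, hm1cast, hq1]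
              simp only [PySem.List.pyGetD_natCast, List.getD_eq_getElem?_getD]
              rw [htotal, htk]
              simp [PySem.List.pySetD_natCast]
            · have hpq : previous[m]?.getD 0 = ((q : Nat) : Int) := by omega
              simp only [iterStepB, PySem.List.pyGetD_natCast, List.getD_eq_getElem?_getD]
              rw [hpq, window_sum cB m q hB1 hqm, sum_drop cB (m - q)]
              simp [add_sub_assoc]
      rw [hcA, hcB]
      have hmlen1 : m < sA.1.length := by omega
      have hmlen2 : m < sA.2.length := by omega
      refine ⟨by simp [hA1], by simp [hA2], by simp [hB1], ?_, ?_⟩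
      · intro k hk
        simp only [List.getD_eq_getElem?_getD]
        by_cases hkm : k = m
        · subst hkm
          rw [List.getElem?_set, if_pos rfl, if_pos hmlen2,
              List.take_of_length_le (by simp [hB1]), List.sum_append]
          simp
          ring
        · rw [List.getElem?_set, if_neg (by omega : ¬ m = k),
              List.take_append_of_le_length (by omega)]
          exact hkk k (by omega)
      · simp only [List.getD_eq_getElem?_getD, show m + 1 - 1 = m by omega]
        rw [List.getElem?_set, if_pos rfl, if_pos hmlen1,
            List.getElem?_append_right (by omega), hB1]
        simp

theorem iter_eq (previous sprocket : List Int)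
    (hne : sprocket ≠ [])
    (hpre : ∀ i < sprocket.length, i = 0 ∨
      (i < previous.length ∧ 0 ≤ previous.getD i 0 ∧ previous.getD i 0 ≤ (i : Int))) :
    iter previous sprocket = iter_alt previous sprocket := by
  have hn : 1 ≤ sprocket.length := List.length_pos_iff.mpr hne
  obtain ⟨hA1, -, hB1, -, hc⟩ := loop_inv previous sprocket hpre sprocket.length hn (le_refl _)
  show PySem.List.pyGetD (stAfun previous sprocket sprocket.length).1 (-1) 0
      = PySem.List.pyGetD (stBfun previous sprocket sprocket.length) (-1) 0
  have hAne : (stAfun previous sprocket sprocket.length).1 ≠ [] := by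
    intro h; rw [h] at hA1; simp at hA1; omega
  have hBne : (stBfun previous sprocket sprocket.length) ≠ [] := by
    intro h; rw [h] at hB1; simp at hB1; omega
  rw [PySem.List.pyGetD_neg_one _ _ hAne, PySem.List.pyGetD_neg_one _ _ hBne,
      List.getLast_eq_getElem, List.getLast_eq_getElem]
  simp only [List.getD_eq_getElem?_getD] at hc
  rw [List.getElem?_eq_getElem (by omega : sprocket.length - 1 < (stAfun previous sprocket sprocket.length).1.length),
      List.getElem?_eq_getElem (by omega : sprocket.length - 1 < (stBfun previous sprocket sprocket.length).length)] at hc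
  simp only [Option.getD_some] at hc
  simp only [hA1, hB1]
  exact hc

-- ===== VERDICT (by name: the statement is the Claim_ definition above) =====
theorem iter_spec : Claim_equal_iter := by
  intro previous sprocket _ hpre
  unfold Spec_iter
  exact iter_eq previous sprocket hpre.1 hpre.2
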